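-- pv_equiv track=rewrite | github.com/bazingaedward/MODES | src/pkgs/dclimate/dclimate.py | CombinationEnumerator
-- ===== SOURCE A (Python) =====
-- def CombinationEnumerator(listObj, selection) :
--     class CombEnum(object) :
--         def __init__(self, listObj, selection) :
--             assert selection <= len(listObj)
--             self.items = listObj
--             self.route = ([True, ]*selection) + [False, ]*(len(listObj)-selection)
--             self.selection = selection
--         def value(self) :
--             result = [ val for flag, val in zip(self.route, self.items) if flag ]
--             return result
--         def next(self) :
--             try :
--                 while self.route[-1] :
--                     self.route.pop()
--                 while not self.route[-1] :
--                     self.route.pop()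
--             except :
--                 return False
--
--             self.route[-1] = False
--
--             count = self.route.count(True)
--             self.route.extend( (self.selection - count) * [True,] )
--             padding = len(self.items) - len(self.route)
--             self.route.extend( padding * [False, ])
--             return True
--
--     if selection == 0 :
--         yield []
--         return
--
--     rotor = CombEnum(listObj, selection)
--     yield rotor.value()
--     while rotor.next() :
--         yield rotor.value()
-- ===== SOURCE B (Python) =====
-- def CombinationEnumerator(listObj, selection):
--     # Recursive take-or-skip enumeration instead of A's mutable bitmask rotor.
--     if selection <= 0:
--         yield []
--         return
--     assert selection <= len(listObj)
--
--     def rec(items, k):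
--         if k == 0:
--             yield []
--             return
--         if not items:
--             return
--         head, rest = items[0], items[1:]
--         for tail in rec(rest, k - 1):
--             yield [head] + tail
--         yield from rec(rest, k)
--
--     yield from rec(listObj, selection)
-- ===== Notes on version B (the rewrite author's own statement) =====
-- stated objective: simpler
-- what changed: Replaces A's mutable boolean-mask rotor (pop trailing flags, flip, re-extend to find the successor mask) with a direct take-or-skip recursion that yields each combination in the same lexicographic index order.
import Mathlib
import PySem

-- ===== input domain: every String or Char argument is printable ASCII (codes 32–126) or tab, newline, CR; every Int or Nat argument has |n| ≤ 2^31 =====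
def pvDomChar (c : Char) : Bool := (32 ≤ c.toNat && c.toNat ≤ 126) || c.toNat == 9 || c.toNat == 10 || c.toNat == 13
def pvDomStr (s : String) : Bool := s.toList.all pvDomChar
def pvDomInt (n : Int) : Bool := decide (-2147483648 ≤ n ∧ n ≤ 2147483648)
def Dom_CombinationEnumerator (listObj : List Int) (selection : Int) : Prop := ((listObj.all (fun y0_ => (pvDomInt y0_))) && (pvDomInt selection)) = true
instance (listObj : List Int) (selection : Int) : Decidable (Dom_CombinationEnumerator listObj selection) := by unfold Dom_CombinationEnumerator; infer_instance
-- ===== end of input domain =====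

-- B replaces A's mutable boolean-mask rotor with a direct take-or-skip recursion (same output, same order); objective: simpler.

-- ===== PORT A =====
-- rotor.value(): [val for flag, val in zip(self.route, self.items) if flag]
def pvValue (route : List Bool) (items : List Int) : List Int :=
  ((route.zip items).filter (fun p => p.1)).map (fun p => p.2)

-- 'while route[-1] == b: route.pop()' acting on the REVERSED route; none = IndexError (list exhausted)
def pvPopWhile (b : Bool) : List Bool → Option (List Bool)
  | [] => none
  | x :: xs => if x = b then pvPopWhile b xs else some (x :: xs)

-- the tail of rotor.next() after the two pop loops succeeded: 'route[-1] = False',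
-- count Trues, extend with Trues, pad with Falses (n = len(self.items); r2 = reversed kept part,
-- whose head is route's last kept element, a True)
def pvFlip (n : Nat) (sel : Int) (r2 : List Bool) : List Bool :=
  let p := (false :: r2.tail).reverse
  let r3 := p ++ List.replicate (sel - (p.count true : Int)).toNat true
  r3 ++ List.replicate (n - r3.length) false

-- rotor.next(): none = 'except: return False'
def pvNext (n : Nat) (sel : Int) (route : List Bool) : Option (List Bool) :=
  (pvPopWhile true route.reverse).bind fun r1 =>
    (pvPopWhile false r1).map fun r2 => pvFlip n sel r2

-- 'yield rotor.value(); while rotor.next(): yield rotor.value()' (fuel is provably sufficient)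
def pvRun (items : List Int) (selection : Int) (route : List Bool) : Nat → List (List Int)
  | 0 => []
  | fuel + 1 =>
    pvValue route items ::
      (match pvNext items.length selection route with
       | none => []
       | some r' => pvRun items selection r' fuel)

def CombinationEnumerator (listObj : List Int) (selection : Int) : List (List Int) :=
  if selection = 0 then [[]]
  else
    let route := List.replicate selection.toNat true ++
                 List.replicate ((listObj.length : Int) - selection).toNat false
    pvRun listObj selection route (2 ^ listObj.length + 1)

-- ===== PORT B =====
-- rec(items, k): take the head or skip it
def pvCombs : List Int → Nat → List (List Int)
  | _, 0 => [[]]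
  | [], _ + 1 => []
  | x :: xs, k + 1 => (pvCombs xs k).map (fun t => x :: t) ++ pvCombs xs (k + 1)

def CombinationEnumerator_alt (listObj : List Int) (selection : Int) : List (List Int) :=
  if selection ≤ 0 then [[]] else pvCombs listObj selection.toNat

-- ===== PRECONDITION & SPEC =====
-- Pre_ excludes selection > len(listObj), where A (and B alike) raise AssertionError.
def Pre_CombinationEnumerator (listObj : List Int) (selection : Int) : Prop :=
  selection ≤ (listObj.length : Int)
instance (listObj : List Int) (selection : Int) : Decidable (Pre_CombinationEnumerator listObj selection) := by unfold Pre_CombinationEnumerator; infer_instance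

def pvWitness_CombinationEnumerator : List Int × Int := ([1, 2, 3, 4], 2)

def Spec_CombinationEnumerator (listObj : List Int) (selection : Int) (out : List (List Int)) : Prop := out = CombinationEnumerator_alt listObj selection
instance (listObj : List Int) (selection : Int) (out : List (List Int)) : Decidable (Spec_CombinationEnumerator listObj selection out) := by unfold Spec_CombinationEnumerator; infer_instance

-- ===== CLAIM (what is proved, stated in full; the proofs are below) =====
def Claim_equal_CombinationEnumerator : Prop := ∀ (listObj : List Int) (selection : Int), Dom_CombinationEnumerator listObj selection → Pre_CombinationEnumerator listObj selection → Spec_CombinationEnumerator listObj selection (CombinationEnumerator listObj selection)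

-- ===== LEMMAS AND PROOFS =====

-- the masks (length n, k trues) in the order B enumerates them
def allMasks : Nat → Nat → List (List Bool)
  | n, 0 => [List.replicate n false]
  | 0, _ + 1 => []
  | n + 1, k + 1 => (allMasks n k).map (true :: ·) ++ (allMasks n (k + 1)).map (false :: ·)

-- consecutive elements are linked by pvNext
def pvLinks (n : Nat) (sel : Int) : List (List Bool) → Prop
  | r :: r' :: rest => pvNext n sel r = some r' ∧ pvLinks n sel (r' :: rest)
  | _ => True

theorem pvLinks_nil (n : Nat) (sel : Int) : pvLinks n sel [] := trivial

theorem pvLinks_single (n : Nat) (sel : Int) (r : List Bool) : pvLinks n sel [r] := trivial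

theorem pvLinks_cons_cons (n : Nat) (sel : Int) (r r' : List Bool) (rest : List (List Bool)) :
    pvLinks n sel (r :: r' :: rest) = (pvNext n sel r = some r' ∧ pvLinks n sel (r' :: rest)) := rfl

-- ---- pvValue lemmas ----
theorem pvValue_cons (b : Bool) (m : List Bool) (x : Int) (xs : List Int) :
    pvValue (b :: m) (x :: xs) = if b then x :: pvValue m xs else pvValue m xs := by
  by_cases hb : b <;> simp [pvValue, hb]

theorem pvValue_replicate_false (m : Nat) (xs : List Int) :
    pvValue (List.replicate m false) xs = [] := by
  induction m generalizing xs with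
  | zero => simp [pvValue]
  | succ m ih =>
    cases xs with
    | nil => simp [pvValue]
    | cons x xs => simpa [List.replicate_succ, pvValue_cons] using ih xs

-- ---- B = map pvValue over allMasks ----
theorem pvCombs_eq_masks (xs : List Int) : ∀ k, pvCombs xs k = (allMasks xs.length k).map (fun m => pvValue m xs) := by
  induction xs with
  | nil =>
    intro k; cases k with
    | zero => simp [pvCombs, allMasks, pvValue]
    | succ k => simp [pvCombs, allMasks]
  | cons x xs ih =>
    intro k; cases k with
    | zero => simp [pvCombs, allMasks, pvValue_replicate_false]
    | succ k =>
      simp only [pvCombs, allMasks, List.length_cons, List.map_append, List.map_map, ih k, ih (k + 1)]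
      congr 1

-- ---- popWhile lemmas ----
theorem pw_ne (b x : Bool) (xs : List Bool) (h : x ≠ b) : pvPopWhile b (x :: xs) = some (x :: xs) := by
  simp [pvPopWhile, h]

theorem pw_strip (b : Bool) (m : Nat) (l : List Bool) :
    pvPopWhile b (List.replicate m b ++ l) = pvPopWhile b l := by
  induction m with
  | zero => simp
  | succ m ih => simpa [List.replicate_succ, pvPopWhile] using ih

theorem pw_some_shape (b : Bool) (l s : List Bool) (h : pvPopWhile b l = some s) :
    ∃ x xs, s = x :: xs ∧ x ≠ b := by
  induction l with
  | nil => simp [pvPopWhile] at h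
  | cons y ys ih =>
    by_cases hy : y = b
    · simp only [pvPopWhile, if_pos hy] at h; exact ih h
    · simp only [pvPopWhile, if_neg hy, Option.some.injEq] at h
      exact ⟨y, ys, h.symm, hy⟩

theorem pw_append_some (b : Bool) (l s t : List Bool) (h : pvPopWhile b l = some s) :
    pvPopWhile b (l ++ t) = some (s ++ t) := by
  induction l with
  | nil => simp [pvPopWhile] at h
  | cons y ys ih =>
    have hstep : ∀ l : List Bool, pvPopWhile b (b :: l) = pvPopWhile b l := fun l => by
      simp [pvPopWhile]
    by_cases hy : y = b
    · subst hy
      rw [hstep] at h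
      rw [List.cons_append, hstep]
      exact ih h
    · simp only [pvPopWhile, if_neg hy, Option.some.injEq] at h
      subst h
      simp [pvPopWhile, hy]

-- ---- pvFlip computations ----
theorem pvFlip_lift (n : Nat) (sel : Int) (b x : Bool) (xs : List Bool) :
    pvFlip (n + 1) (sel + (if b then 1 else 0)) (x :: (xs ++ [b])) = b :: pvFlip n sel (x :: xs) := by
  unfold pvFlip
  simp only [List.tail_cons]
  have hp : (false :: (xs ++ [b])).reverse = b :: (false :: xs).reverse := by simp
  rw [hp]
  have hc : (((b :: (false :: xs).reverse).count true : Nat) : Int)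
      = ((false :: xs).reverse.count true : Int) + (if b then 1 else 0) := by
    cases b <;> simp
  rw [hc]
  have hsel : sel + (if b then 1 else 0) - (((false :: xs).reverse.count true : Int) + (if b then 1 else 0))
      = sel - ((false :: xs).reverse.count true : Int) := by ring
  rw [hsel]
  simp only [List.cons_append, List.length_cons, List.length_append, List.length_replicate,
    List.length_reverse]
  have hP : n + 1 - (xs.length + 1 + (sel - ((List.count true (false :: xs).reverse : Nat) : Int)).toNat + 1)
      = n - (xs.length + 1 + (sel - ((List.count true (false :: xs).reverse : Nat) : Int)).toNat) := by
    omega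
  rw [hP]

theorem pvFlip_single (n k : Nat) :
    pvFlip (n + 1) ((k : Int) + 1) [true]
      = false :: (List.replicate (k + 1) true ++ List.replicate (n - (k + 1)) false) := by
  unfold pvFlip
  simp only [List.tail_cons, List.reverse_cons, List.reverse_nil, List.nil_append]
  have hcount : List.count true [false] = 0 := by simp
  rw [hcount]
  have h1 : ((k : Int) + 1 - ((0 : Nat) : Int)).toNat = k + 1 := by omega
  rw [h1]
  have h2 : (n + 1) - ([false] ++ List.replicate (k + 1) true).length = n - (k + 1) := by
    simp only [List.length_append, List.length_replicate, List.length_cons, List.length_nil]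
    omega
  rw [h2]
  simp

-- ---- pvNext on the three relevant shapes ----
theorem pvNext_end (n : Nat) (sel : Int) (f t : Nat) :
    pvNext n sel (List.replicate f false ++ List.replicate t true) = none := by
  unfold pvNext
  have hrev : (List.replicate f false ++ List.replicate t true).reverse
      = List.replicate t true ++ List.replicate f false := by simp
  rw [hrev, pw_strip]
  cases f with
  | zero => simp [pvPopWhile]
  | succ f =>
    have h1 : pvPopWhile true (List.replicate (f + 1) false)
        = some (List.replicate (f + 1) false) := by
      rw [List.replicate_succ]; exact pw_ne _ _ _ (by simp)
    have h2 : pvPopWhile false (List.replicate (f + 1) false) = none := by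
      simpa using pw_strip false (f + 1) ([] : List Bool)
    simp [h1, h2]

theorem pvNext_lift (n : Nat) (sel : Int) (b : Bool) (r r' : List Bool)
    (h : pvNext n sel r = some r') :
    pvNext (n + 1) (sel + (if b then 1 else 0)) (b :: r) = some (b :: r') := by
  unfold pvNext at h ⊢
  cases h1 : pvPopWhile true r.reverse with
  | none => rw [h1] at h; simp at h
  | some s1 =>
    rw [h1] at h
    simp only [Option.bind_some] at h
    rw [List.reverse_cons, pw_append_some true r.reverse s1 [b] h1]
    simp only [Option.bind_some]
    cases h2 : pvPopWhile false s1 with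
    | none => rw [h2] at h; simp at h
    | some s2 =>
      rw [h2, Option.map_some, Option.some.injEq] at h
      rw [pw_append_some false s1 s2 [b] h2, Option.map_some]
      obtain ⟨x, xs, rfl, _⟩ := pw_some_shape false s1 s2 h2
      rw [← h, List.cons_append]
      exact congrArg some (pvFlip_lift n sel b x xs)

theorem pvNext_boundary (n k f : Nat) :
    pvNext (n + 1) ((k : Int) + 1) (true :: (List.replicate (f + 1) false ++ List.replicate k true))
      = some (false :: (List.replicate (k + 1) true ++ List.replicate (n - (k + 1)) false)) := by
  unfold pvNext
  have hrev : (true :: (List.replicate (f + 1) false ++ List.replicate k true)).reverse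
      = List.replicate k true ++ (List.replicate (f + 1) false ++ [true]) := by simp
  rw [hrev, pw_strip]
  have h1 : pvPopWhile true (List.replicate (f + 1) false ++ [true])
      = some (List.replicate (f + 1) false ++ [true]) := by
    rw [List.replicate_succ, List.cons_append]; exact pw_ne _ _ _ (by simp)
  rw [h1]
  simp only [Option.bind_some]
  rw [pw_strip false (f + 1) [true], pw_ne false true [] (by simp), Option.map_some]
  exact congrArg some (pvFlip_single n k)

-- ---- pvLinks combinators ----
theorem pvLinks_append (n : Nat) (sel : Int) (L1 L2 : List (List Bool))
    (h1 : pvLinks n sel L1) (h2 : pvLinks n sel L2)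
    (hmid : ∀ a, L1.getLast? = some a → ∀ c, L2.head? = some c → pvNext n sel a = some c) :
    pvLinks n sel (L1 ++ L2) := by
  induction L1 with
  | nil => exact h2
  | cons a L1 ih =>
    cases L1 with
    | nil =>
      cases L2 with
      | nil => exact pvLinks_single n sel a
      | cons c L2 =>
        rw [List.cons_append, List.nil_append, pvLinks_cons_cons]
        exact ⟨hmid a (by simp) c (by simp), h2⟩
    | cons a' L1' =>
      rw [pvLinks_cons_cons] at h1
      obtain ⟨hl, hrest⟩ := h1
      rw [List.cons_append, List.cons_append, pvLinks_cons_cons]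
      refine ⟨hl, ?_⟩
      have := ih hrest (fun x hx c hc => hmid x (by simpa using hx) c hc)
      simpa using this

theorem pvLinks_map_cons (n : Nat) (sel : Int) (b : Bool) (L : List (List Bool))
    (h : pvLinks n sel L) :
    pvLinks (n + 1) (sel + (if b then 1 else 0)) (L.map (b :: ·)) := by
  induction L with
  | nil => exact pvLinks_nil _ _
  | cons r L ih =>
    cases L with
    | nil => exact pvLinks_single _ _ _
    | cons r' rest =>
      rw [pvLinks_cons_cons] at h
      obtain ⟨hl, hrest⟩ := h
      rw [List.map_cons, List.map_cons, pvLinks_cons_cons]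
      exact ⟨pvNext_lift n sel b r r' hl, ih hrest⟩

-- ---- allMasks structure lemmas ----
theorem allMasks_nil (n k : Nat) (h : n < k) : allMasks n k = [] := by
  induction n generalizing k with
  | zero => cases k with | zero => omega | succ k => simp [allMasks]
  | succ n ih =>
    cases k with
    | zero => omega
    | succ k => simp [allMasks, ih k (by omega), ih (k + 1) (by omega)]

theorem allMasks_head (n k : Nat) (h : k ≤ n) :
    (allMasks n k).head? = some (List.replicate k true ++ List.replicate (n - k) false) := by
  induction n generalizing k with
  | zero =>
    cases k with
    | zero => simp [allMasks]
    | succ k => omega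
  | succ n ih =>
    cases k with
    | zero => simp [allMasks]
    | succ k =>
      have hk : k ≤ n := by omega
      simp only [allMasks, List.head?_append, List.head?_map, ih k hk]
      simp [List.replicate_succ]

theorem allMasks_last (n k : Nat) (h : k ≤ n) :
    (allMasks n k).getLast? = some (List.replicate (n - k) false ++ List.replicate k true) := by
  induction n generalizing k with
  | zero =>
    cases k with
    | zero => simp [allMasks]
    | succ k => omega
  | succ n ih =>
    cases k with
    | zero => simp [allMasks]
    | succ k =>
      by_cases hk : k + 1 ≤ n
      · have h2 : allMasks n (k + 1) ≠ [] := by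
          intro hnil
          have hthis := ih (k + 1) hk
          rw [hnil] at hthis
          simp at hthis
        simp only [allMasks, List.getLast?_append, List.getLast?_map, ih (k + 1) hk,
          Option.map_some, Option.some_or]
        have hr : (n + 1) - (k + 1) = (n - (k + 1)) + 1 := by omega
        simp [hr, List.replicate_succ]
      · have hkn : k = n := by omega
        subst hkn
        have h2 : allMasks k (k + 1) = [] := allMasks_nil k (k + 1) (by omega)
        simp only [allMasks, h2, List.map_nil, List.append_nil, List.getLast?_map,
          ih k (le_refl k), Option.map_some]
        simp [List.replicate_succ]

theorem allMasks_length_le (n k : Nat) : (allMasks n k).length ≤ 2 ^ n := by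
  induction n generalizing k with
  | zero => cases k <;> simp [allMasks]
  | succ n ih =>
    cases k with
    | zero =>
      simp only [allMasks, List.length_singleton]
      exact Nat.one_le_two_pow
    | succ k =>
      have ha := ih k; have hb := ih (k + 1)
      simp only [allMasks, List.length_append, List.length_map, pow_succ]
      omega

-- ---- the main chain theorem ----
theorem pvLinks_allMasks (n k : Nat) : pvLinks n (k : Int) (allMasks n k) := by
  induction n generalizing k with
  | zero => cases k with
    | zero => exact pvLinks_single _ _ _
    | succ k => exact pvLinks_nil _ _
  | succ n ih =>
    cases k with
    | zero => exact pvLinks_single _ _ _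
    | succ k =>
      simp only [allMasks]
      apply pvLinks_append
      · have hm := pvLinks_map_cons n (k : Int) true (allMasks n k) (ih k)
        have hc : ((k : Int) + if true then 1 else 0) = (((k + 1 : Nat)) : Int) := by
          simp
        rwa [hc] at hm
      · have hbase : pvLinks n ((k : Int) + 1) (allMasks n (k + 1)) := by
          have := ih (k + 1); push_cast at this; exact_mod_cast this
        have hm := pvLinks_map_cons n ((k : Int) + 1) false (allMasks n (k + 1)) hbase
        have hc : ((k : Int) + 1 + if false then 1 else 0) = (((k + 1 : Nat)) : Int) := by
          simp
        rwa [hc] at hm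
      · intro a ha c hc
        by_cases hk : k + 1 ≤ n
        · rw [List.getLast?_map, allMasks_last n k (by omega)] at ha
          rw [List.head?_map, allMasks_head n (k + 1) hk] at hc
          simp only [Option.map_some, Option.some.injEq] at ha hc
          subst ha; subst hc
          have hcast : (((k + 1 : Nat)) : Int) = (k : Int) + 1 := by push_cast; ring
          have hf : n - k = (n - k - 1) + 1 := by omega
          rw [hcast, hf]
          exact pvNext_boundary n k (n - k - 1)
        · exfalso
          rw [List.head?_map, allMasks_nil n (k + 1) (by omega)] at hc
          simp at hc

-- ---- running the rotor along a chain ----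
theorem pvRun_of_chain (items : List Int) (sel : Int) :
    ∀ (rest : List (List Bool)) (fuel : Nat) (r : List Bool),
      pvLinks items.length sel (r :: rest) →
      (∀ a, (r :: rest).getLast? = some a → pvNext items.length sel a = none) →
      rest.length + 1 ≤ fuel →
      pvRun items sel r fuel = (r :: rest).map (fun m => pvValue m items) := by
  intro rest
  induction rest with
  | nil =>
    intro fuel r _ hLast hLen
    cases fuel with
    | zero => omega
    | succ fuel => simp [pvRun, hLast r (by simp)]
  | cons r' rest ih =>
    intro fuel r hLinks hLast hLen
    cases fuel with
    | zero => simp at hLen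
    | succ fuel =>
      rw [pvLinks_cons_cons] at hLinks
      obtain ⟨hl, hrest⟩ := hLinks
      simp only [pvRun, hl]
      rw [ih fuel r' hrest (fun a ha => hLast a (by simpa using ha)) (by simpa using hLen)]
      simp

-- ===== VERDICT (by name: the statement is the Claim_ definition above) =====
theorem CombinationEnumerator_spec : Claim_equal_CombinationEnumerator := by
  intro listObj selection _ hpre
  unfold Pre_CombinationEnumerator at hpre
  unfold Spec_CombinationEnumerator CombinationEnumerator CombinationEnumerator_alt
  by_cases h0 : selection = 0
  · simp [h0]
  · rw [if_neg h0]
    by_cases hneg : selection ≤ 0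
    · rw [if_pos hneg]
      have h1 : selection.toNat = 0 := by omega
      rw [h1]
      simp only [List.replicate_zero, List.nil_append]
      have hend := pvNext_end listObj.length selection (((listObj.length : Int) - selection).toNat) 0
      simp only [List.replicate_zero, List.append_nil] at hend
      simp [pvRun, hend, pvValue_replicate_false]
    · rw [if_neg hneg]
      have hkn : selection.toNat ≤ listObj.length := by omega
      have hroute : ((listObj.length : Int) - selection).toNat = listObj.length - selection.toNat := by
        omega
      rw [hroute]
      have hhead := allMasks_head listObj.length selection.toNat hkn
      obtain ⟨rest, hL⟩ : ∃ rest, allMasks listObj.length selection.toNat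
          = (List.replicate selection.toNat true ++ List.replicate (listObj.length - selection.toNat) false) :: rest := by
        cases hM : allMasks listObj.length selection.toNat with
        | nil => rw [hM] at hhead; simp at hhead
        | cons a rest =>
          rw [hM] at hhead
          simp only [List.head?_cons, Option.some.injEq] at hhead
          exact ⟨rest, by rw [hhead]⟩
      have hlinks : pvLinks listObj.length selection (allMasks listObj.length selection.toNat) := by
        have hm := pvLinks_allMasks listObj.length selection.toNat
        rwa [show ((selection.toNat : Nat) : Int) = selection by omega] at hm
      have hlast : ∀ a, (allMasks listObj.length selection.toNat).getLast? = some a →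
          pvNext listObj.length selection a = none := by
        intro a ha
        rw [allMasks_last listObj.length selection.toNat hkn] at ha
        injection ha with ha
        subst ha
        exact pvNext_end listObj.length selection _ _
      have hlen : (allMasks listObj.length selection.toNat).length ≤ 2 ^ listObj.length + 1 := by
        have hb := allMasks_length_le listObj.length selection.toNat; omega
      have hrun := pvRun_of_chain listObj selection rest (2 ^ listObj.length + 1)
        (List.replicate selection.toNat true ++ List.replicate (listObj.length - selection.toNat) false)
        (by rw [← hL]; exact hlinks)
        (by rw [← hL]; exact hlast)
        (by rw [hL] at hlen; simpa using hlen)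
      rw [hrun, ← hL, pvCombs_eq_masks listObj selection.toNat]
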